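-- pv_equiv track=rewrite | github.com/ShivamInnovates/Satkaam_MCQ_Solver | form_bot.py | find_personal_answer
-- ===== SOURCE A (Python) =====
-- def find_personal_answer(label: str, personal_info: dict) -> str | None:
--     """
--     Try to match a form field label to a key in personal_info.
--     Case-insensitive, partial match.
--     """
--     label_lower = label.lower().strip()
--     # Direct match
--     for key, val in personal_info.items():
--         if key.lower() == label_lower:
--             return val
--     # Partial match (label contains key or key contains label)
--     # Sort by descending key length to prioritize longer matches (e.g., "Branch-Division" before "Branch")
--     for key, val in sorted(personal_info.items(), key=lambda x: len(x[0]), reverse=True):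
--         if key.lower() in label_lower or label_lower in key.lower():
--             return val
--     return None
-- ===== SOURCE B (Python) =====
-- def find_personal_answer(label: str, personal_info: dict) -> str | None:
--     label_lower = label.lower().strip()
--     # Direct match (unchanged semantics: first case-insensitive exact key match)
--     for key, val in personal_info.items():
--         if key.lower() == label_lower:
--             return val
--     # Partial match: one linear max-selection pass instead of sort-then-first-match;
--     # strict '>' keeps the first key of maximal length, like the stable descending sort.
--     best_val, best_len = None, -1
--     for key, val in personal_info.items():
--         kl = key.lower()
--         if (kl in label_lower or label_lower in kl) and len(key) > best_len:
--             best_val, best_len = val, len(key)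
--     return best_val
-- ===== Notes on version B (the rewrite author's own statement) =====
-- stated objective: alternative
-- what changed: The partial-match phase no longer sorts all items by descending key length and returns the first match; instead a single linear pass tracks the best partial match (strictly longer key replaces, so the first key of maximal length wins, exactly as the stable descending sort); it trades A's early exit after the sort for a sort-free full scan.
import Mathlib
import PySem

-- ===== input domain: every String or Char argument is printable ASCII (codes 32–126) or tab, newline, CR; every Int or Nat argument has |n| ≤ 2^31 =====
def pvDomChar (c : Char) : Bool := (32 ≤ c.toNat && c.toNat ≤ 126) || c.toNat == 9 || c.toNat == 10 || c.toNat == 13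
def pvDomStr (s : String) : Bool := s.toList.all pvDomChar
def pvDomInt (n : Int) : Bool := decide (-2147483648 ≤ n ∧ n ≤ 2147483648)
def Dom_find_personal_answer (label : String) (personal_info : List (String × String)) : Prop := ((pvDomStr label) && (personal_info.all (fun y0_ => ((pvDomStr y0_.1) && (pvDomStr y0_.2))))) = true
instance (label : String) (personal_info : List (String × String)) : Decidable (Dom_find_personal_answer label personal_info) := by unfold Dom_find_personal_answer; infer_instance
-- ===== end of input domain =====

-- B replaces A's sort-then-first-match partial pass by one linear max-selection scan (no sort; alternative algorithm, same result).

-- ===== PORT A =====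
-- first loop of A: return val on first exact case-insensitive key match
def fpaDirect (label_lower : String) : List (String × String) → Option String
  | [] => none
  | (key, val) :: rest =>
    if PySem.Str.lower key == label_lower then some val else fpaDirect label_lower rest

-- second loop of A: return val on first partial match (over the sorted list)
def fpaPartial (label_lower : String) : List (String × String) → Option String
  | [] => none
  | (key, val) :: rest =>
    if PySem.Str.isIn (PySem.Str.lower key) label_lower || PySem.Str.isIn label_lower (PySem.Str.lower key)
    then some val else fpaPartial label_lower rest

def find_personal_answer (label : String) (personal_info : List (String × String)) : Option String :=
  let label_lower := PySem.Str.strip (PySem.Str.lower label)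
  match fpaDirect label_lower personal_info with
  | some v => some v
  | none =>
    fpaPartial label_lower
      (PySem.List.sorted personal_info (fun x => PySem.Str.len x.1) true)

-- ===== PORT B =====
def find_personal_answer_alt (label : String) (personal_info : List (String × String)) : Option String :=
  let label_lower := PySem.Str.strip (PySem.Str.lower label)
  match personal_info.find? (fun kv => PySem.Str.lower kv.1 == label_lower) with
  | some kv => some kv.2
  | none =>
    (personal_info.foldl
      (fun st kv =>
        let kl := PySem.Str.lower kv.1
        if (PySem.Str.isIn kl label_lower || PySem.Str.isIn label_lower kl)
            && decide (st.2 < PySem.Str.len kv.1)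
        then (some kv.2, PySem.Str.len kv.1) else st)
      ((none : Option String), (-1 : Int))).1

-- ===== PRECONDITION & SPEC =====
def Spec_find_personal_answer (label : String) (personal_info : List (String × String)) (out : Option String) : Prop := out = find_personal_answer_alt label personal_info
instance (label : String) (personal_info : List (String × String)) (out : Option String) : Decidable (Spec_find_personal_answer label personal_info out) := by unfold Spec_find_personal_answer; infer_instance

-- ===== CLAIM (what is proved, stated in full; the proofs are below) =====
def Claim_equal_find_personal_answer : Prop := ∀ (label : String) (personal_info : List (String × String)), Dom_find_personal_answer label personal_info → Spec_find_personal_answer label personal_info (find_personal_answer label personal_info)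

-- ===== LEMMAS AND PROOFS =====

-- A's direct loop is find? followed by projection
theorem fpaDirect_eq_find? (ll : String) (xs : List (String × String)) :
    fpaDirect ll xs = (xs.find? (fun kv => PySem.Str.lower kv.1 == ll)).map (·.2) := by
  induction xs with
  | nil => rfl
  | cons kv rest ih =>
    obtain ⟨k, v⟩ := kv
    simp only [fpaDirect, List.find?]
    by_cases h : (PySem.Str.lower k == ll) = true
    · simp [h]
    · simp only [Bool.not_eq_true] at h
      simp [h, ih]

-- A's partial loop is find? followed by projection
theorem fpaPartial_eq_find? (ll : String) (xs : List (String × String)) :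
    fpaPartial ll xs =
      (xs.find? (fun kv => PySem.Str.isIn (PySem.Str.lower kv.1) ll
          || PySem.Str.isIn ll (PySem.Str.lower kv.1))).map (·.2) := by
  induction xs with
  | nil => rfl
  | cons kv rest ih =>
    obtain ⟨k, v⟩ := kv
    simp only [fpaPartial, List.find?]
    by_cases h : (PySem.Str.isIn (PySem.Str.lower k) ll || PySem.Str.isIn ll (PySem.Str.lower k)) = true
    · simp only [h]
      simp
    · simp only [Bool.not_eq_true] at h
      simp only [h]
      simp [ih]

-- inserting a non-matching element does not change find?
theorem find?_insertBy_notp {α : Type} (p : α → Bool) (b : α → α → Bool) (x : α)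
    (acc : List α) (hx : p x = false) :
    (PySem.List.insertBy b x acc).find? p = acc.find? p := by
  induction acc with
  | nil => simp [PySem.List.insertBy, hx]
  | cons y ys ih =>
    simp only [PySem.List.insertBy]
    by_cases hb : b x y = true
    · simp [hb, hx]
    · simp only [Bool.not_eq_true] at hb
      simp only [hb, Bool.false_eq_true, if_false, List.find?]
      cases hpy : p y <;> simp [ih]

-- inserting a matcher strictly longer than every matcher of acc makes it the first matcher
theorem find?_insertBy_new {α : Type} (p : α → Bool) (key : α → Int) (x : α)
    (acc : List α) (hx : p x = true)
    (hlt : ∀ y ∈ acc, p y = true → key y < key x) :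
    (PySem.List.insertBy (fun a b => decide (key b < key a)) x acc).find? p = some x := by
  induction acc with
  | nil => simp [PySem.List.insertBy, hx]
  | cons y ys ih =>
    simp only [PySem.List.insertBy]
    by_cases hb : key y < key x
    · simp [hb, hx]
    · have hpy : p y = false := by
        cases hpy : p y
        · rfl
        · exact absurd (hlt y (by simp) hpy) hb
      simp only [decide_eq_true_eq]
      rw [if_neg hb]
      simp only [List.find?, hpy]
      exact ih (fun z hz hpz => hlt z (by simp [hz]) hpz)

-- with a first matcher m at least as long as x, inserting x does not change find?
theorem find?_insertBy_old {α : Type} (p : α → Bool) (key : α → Int) (x m : α)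
    (acc : List α) (hpw : acc.Pairwise (fun a b => key b ≤ key a))
    (hm : acc.find? p = some m) (hle : key x ≤ key m) :
    (PySem.List.insertBy (fun a b => decide (key b < key a)) x acc).find? p = some m := by
  induction acc with
  | nil => simp [List.find?] at hm
  | cons y ys ih =>
    rw [List.pairwise_cons] at hpw
    simp only [PySem.List.insertBy]
    by_cases hb : key y < key x
    · exfalso
      cases hpy : p y with
      | true =>
        simp only [List.find?, hpy, Option.some.injEq] at hm
        subst hm
        omega
      | false =>
        simp only [List.find?, hpy] at hm
        have hmem : m ∈ ys := List.mem_of_find?_eq_some hm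
        have := hpw.1 m hmem
        omega
    · simp only [decide_eq_true_eq]
      rw [if_neg hb]
      simp only [List.find?]
      cases hpy : p y with
      | true =>
        simp only [List.find?, hpy] at hm
        simpa using hm
      | false =>
        simp only [List.find?, hpy] at hm
        exact ih hpw.2 hm

-- insertBy for descending order preserves the descending Pairwise invariant
theorem pairwise_insertBy {α : Type} (key : α → Int) (x : α) (acc : List α)
    (hpw : acc.Pairwise (fun a b => key b ≤ key a)) :
    (PySem.List.insertBy (fun a b => decide (key b < key a)) x acc).Pairwise
      (fun a b => key b ≤ key a) := by
  induction acc with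
  | nil => simp [PySem.List.insertBy]
  | cons y ys ih =>
    rw [List.pairwise_cons] at hpw
    simp only [PySem.List.insertBy]
    by_cases hb : key y < key x
    · simp only [decide_eq_true_eq]
      rw [if_pos hb]
      refine List.pairwise_cons.mpr ⟨?_, List.pairwise_cons.mpr hpw⟩
      intro z hz
      rcases List.mem_cons.mp hz with rfl | hz
      · omega
      · have := hpw.1 z hz; omega
    · simp only [decide_eq_true_eq]
      rw [if_neg hb]
      refine List.pairwise_cons.mpr ⟨?_, ih hpw.2⟩
      intro z hz
      rcases (PySem.List.mem_insertBy _ x z ys).mp hz with rfl | hz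
      · omega
      · exact hpw.1 z hz

-- in a descending list, the first matcher has maximal key among matchers
theorem find?_bound {α : Type} (p : α → Bool) (key : α → Int) (m : α) (acc : List α)
    (hpw : acc.Pairwise (fun a b => key b ≤ key a)) (hm : acc.find? p = some m) :
    ∀ y ∈ acc, p y = true → key y ≤ key m := by
  induction acc with
  | nil => simp [List.find?] at hm
  | cons z zs ih =>
    rw [List.pairwise_cons] at hpw
    intro y hy hpy
    cases hpz : p z with
    | true =>
      simp only [List.find?, hpz, Option.some.injEq] at hm
      subst hm
      rcases List.mem_cons.mp hy with rfl | hy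
      · omega
      · exact hpw.1 y hy
    | false =>
      simp only [List.find?, hpz] at hm
      rcases List.mem_cons.mp hy with rfl | hy
      · rw [hpz] at hpy; exact absurd hpy (by simp)
      · exact ih hpw.2 hm y hy hpy

-- the state/accumulator simulation between A's insertion fold and B's max-selection fold
theorem fold_inv {α : Type} (p : α → Bool) (key : α → Int) (f : α → String)
    (hkey : ∀ x, 0 ≤ key x) (xs : List α) :
    ∀ (acc : List α) (st : Option String × Int),
      acc.Pairwise (fun a b => key b ≤ key a) →
      (match acc.find? p with
       | none => st = (none, -1)
       | some m => st = (some (f m), key m)) →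
      (match ((xs.foldl (fun ac x =>
          PySem.List.insertBy (fun a b => decide (key b < key a)) x ac) acc).find? p) with
       | none =>
          xs.foldl (fun s x => if p x && decide (s.2 < key x) then (some (f x), key x) else s) st
            = (none, -1)
       | some m =>
          xs.foldl (fun s x => if p x && decide (s.2 < key x) then (some (f x), key x) else s) st
            = (some (f m), key m)) := by
  induction xs with
  | nil => intro acc st hpw hst; simpa using hst
  | cons x rest ih =>
    intro acc st hpw hst
    simp only [List.foldl_cons]
    apply ih
    · exact pairwise_insertBy key x acc hpw
    · cases hfm : acc.find? p with
      | none =>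
        simp only [hfm] at hst
        subst hst
        cases hpx : p x with
        | false =>
          rw [find?_insertBy_notp p _ x acc hpx, hfm]
          simp
        | true =>
          have hnew : (PySem.List.insertBy (fun a b => decide (key b < key a)) x acc).find? p
              = some x := by
            apply find?_insertBy_new p key x acc hpx
            intro y hy hpy
            exact absurd (List.find?_eq_none.mp hfm y hy) (by simp [hpy])
          rw [hnew]
          have : (-1 : Int) < key x := by have := hkey x; omega
          simp [this]
      | some m =>
        simp only [hfm] at hst
        subst hst
        cases hpx : p x with
        | false =>
          rw [find?_insertBy_notp p _ x acc hpx, hfm]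
          simp
        | true =>
          by_cases hgt : key m < key x
          · have hnew : (PySem.List.insertBy (fun a b => decide (key b < key a)) x acc).find? p
                = some x := by
              apply find?_insertBy_new p key x acc hpx
              intro y hy hpy
              have := find?_bound p key m acc hpw hfm y hy hpy
              omega
            rw [hnew]
            simp [hgt]
          · have hold := find?_insertBy_old p key x m acc hpw hfm (by omega)
            rw [hold]
            simp only [Bool.true_and]
            rw [if_neg (by simp; omega)]

-- lengths are nonnegative
theorem len_nonneg (s : String) : 0 ≤ PySem.Str.len s := by
  simp [PySem.Str.len_eq]

-- ===== VERDICT (by name: the statement is the Claim_ definition above) =====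
theorem find_personal_answer_spec : Claim_equal_find_personal_answer := by
  intro label personal_info _
  unfold Spec_find_personal_answer find_personal_answer find_personal_answer_alt
  simp only []
  set ll := PySem.Str.strip (PySem.Str.lower label) with hll
  rw [fpaDirect_eq_find?]
  cases hd : personal_info.find? (fun kv => PySem.Str.lower kv.1 == ll) with
  | some kv => simp
  | none =>
    simp only [Option.map_none]
    rw [fpaPartial_eq_find?]
    have hmain := fold_inv
      (fun kv => PySem.Str.isIn (PySem.Str.lower kv.1) ll || PySem.Str.isIn ll (PySem.Str.lower kv.1))
      (fun kv => PySem.Str.len kv.1) (fun kv => kv.2) (fun x => len_nonneg x.1)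
      personal_info [] ((none : Option String), (-1 : Int)) (by simp) (by simp [List.find?])
    rw [← PySem.List.sorted_rev_eq_foldl_insertBy personal_info (fun kv => PySem.Str.len kv.1)]
      at hmain
    cases hfm : List.find?
        (fun kv => PySem.Str.isIn (PySem.Str.lower kv.1) ll || PySem.Str.isIn ll (PySem.Str.lower kv.1))
        (PySem.List.sorted personal_info (fun x => PySem.Str.len x.1) true) with
    | none =>
      simp only [hfm] at hmain
      simp only [Option.map_none]
      exact (congrArg Prod.fst hmain).symm
    | some m =>
      simp only [hfm] at hmain
      simp only [Option.map_some]
      exact (congrArg Prod.fst hmain).symm
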